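-- pv_equiv track=rewrite | github.com/BenWoodland/slicermodifications | ProcessorWriterJupyter.py | select_min_key
-- ===== SOURCE A (Python) =====
-- def select_min_key(d):
--     # Step 1: Keys with odd-length lists
--     odd_keys = [k for k in d if len(d[k]) % 2 == 1]
--
--     if odd_keys:
--         # Return the key with the shortest odd-length list
--         return min(odd_keys, key=lambda k: len(d[k]))
--     else:
--         # Step 2: If no odd-length lists, get keys with even-length lists
--         even_keys = [k for k in d if len(d[k]) % 2 == 0]
--         if even_keys:
--             return min(even_keys, key=lambda k: len(d[k]))
--         else:
--             return None  # In case all lists are empty or something went wrong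
-- ===== SOURCE B (Python) =====
-- def select_min_key(d):
--     # Alternative decomposition: one stable sort by list length, then a single
--     # scan for the first odd-length key; falls back to the overall first key.
--     keys_sorted = sorted(d, key=lambda k: len(d[k]))
--     for k in keys_sorted:
--         if len(d[k]) % 2 == 1:
--             return k
--     return keys_sorted[0] if keys_sorted else None
-- ===== Notes on version B (the rewrite author's own statement) =====
-- stated objective: alternative
-- what changed: Replaces the two filter-then-min passes by one stable sort on list length followed by a single scan returning the first odd-length key (else the first key overall); stability makes ties resolve to the first key in iteration order exactly as min does.
import Mathlib
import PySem

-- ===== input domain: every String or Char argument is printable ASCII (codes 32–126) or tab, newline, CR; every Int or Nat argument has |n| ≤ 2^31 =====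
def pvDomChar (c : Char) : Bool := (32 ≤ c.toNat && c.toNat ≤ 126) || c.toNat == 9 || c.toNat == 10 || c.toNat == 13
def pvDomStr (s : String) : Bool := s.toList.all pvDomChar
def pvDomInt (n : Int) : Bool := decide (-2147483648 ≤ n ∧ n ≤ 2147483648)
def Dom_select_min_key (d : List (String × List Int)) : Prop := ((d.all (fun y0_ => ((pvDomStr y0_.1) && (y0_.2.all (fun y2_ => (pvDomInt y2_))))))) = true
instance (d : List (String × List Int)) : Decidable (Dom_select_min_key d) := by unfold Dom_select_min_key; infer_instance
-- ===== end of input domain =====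

-- B replaces A's two filter-then-min passes by one stable sort on list length plus a single
-- scan for the first odd-length key (falling back to the first key overall); same cost class,
-- alternative decomposition.


-- shared accessor for `len(d[k])` (dict lookup = first match, as in the type convention)
def pyLen (d : List (String × List Int)) (k : String) : Nat :=
  ((d.lookup k).getD []).length

-- ===== PORT A =====
def select_min_key (d : List (String × List Int)) : Option String :=
  let odd_keys := (d.map Prod.fst).filter (fun k => pyLen d k % 2 == 1)
  if odd_keys ≠ [] then
    PySem.List.min? odd_keys (pyLen d)
  else
    let even_keys := (d.map Prod.fst).filter (fun k => pyLen d k % 2 == 0)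
    if even_keys ≠ [] then
      PySem.List.min? even_keys (pyLen d)
    else
      none

-- ===== PORT B =====
-- the `for k in keys_sorted: if odd: return k` loop of Source B
def firstOddKey (d : List (String × List Int)) : List String → Option String
  | [] => none
  | k :: rest => if pyLen d k % 2 == 1 then some k else firstOddKey d rest

def select_min_key_alt (d : List (String × List Int)) : Option String :=
  let keys_sorted := PySem.List.sorted (d.map Prod.fst) (pyLen d) false
  match firstOddKey d keys_sorted with
  | some k => some k
  | none => keys_sorted.head?

-- ===== PRECONDITION & SPEC =====
def Spec_select_min_key (d : List (String × List Int)) (out : Option String) : Prop := out = select_min_key_alt d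
instance (d : List (String × List Int)) (out : Option String) : Decidable (Spec_select_min_key d out) := by unfold Spec_select_min_key; infer_instance

-- ===== CLAIM (what is proved, stated in full; the proofs are below) =====
def Claim_equal_select_min_key : Prop := ∀ (d : List (String × List Int)), Dom_select_min_key d → Spec_select_min_key d (select_min_key d)

-- ===== LEMMAS AND PROOFS =====

-- filter commutes with stable insertion into a sorted list
theorem pv_ins_filter {α : Type} (key : α → Nat) (p : α → Bool) (x : α) (l : List α)
    (h : l.Pairwise (fun a b => key a ≤ key b)) :
    (PySem.List.insertBy (fun a b => decide (key a < key b)) x l).filter p =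
      if p x then PySem.List.insertBy (fun a b => decide (key a < key b)) x (l.filter p)
      else l.filter p := by
  induction l with
  | nil => cases hpx : p x <;> simp [PySem.List.insertBy, hpx]
  | cons y ys ih =>
    rcases List.pairwise_cons.mp h with ⟨hy, hys⟩
    by_cases hxy : key x < key y
    · simp only [PySem.List.insertBy, hxy, decide_true, if_pos]
      -- x goes to the very front; in the filtered list it is also in front of everything
      cases hpx : p x
      · simp [List.filter_cons, hpx]
      · cases hpy : p y
        · simp only [List.filter_cons, hpx, hpy]
          cases hf : (ys.filter p) with
          | nil => simp [PySem.List.insertBy]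
          | cons z zs =>
            have hz : z ∈ ys.filter p := by rw [hf]; exact List.mem_cons_self
            have hz' : key x < key z :=
              Nat.lt_of_lt_of_le hxy (hy _ (List.mem_of_mem_filter hz))
            simp [PySem.List.insertBy, hz']
        · simp [hpx, hpy, PySem.List.insertBy, hxy]
    · have hih := ih hys
      cases hpx : p x
      · rw [hpx] at hih; simp at hih
        cases hpy : p y <;>
          simp [PySem.List.insertBy, hxy, hpy, hih]
      · rw [hpx] at hih; simp at hih
        cases hpy : p y <;>
          simp [PySem.List.insertBy, hxy, hpy, hih]

-- stable sort commutes with filter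
theorem pv_sorted_filter {α : Type} (key : α → Nat) (p : α → Bool) (xs : List α) :
    (PySem.List.sorted xs key false).filter p = PySem.List.sorted (xs.filter p) key false := by
  induction xs using List.reverseRecOn with
  | nil => simp [PySem.List.sorted]
  | append_singleton xs x ih =>
    have hstep : ∀ (l : List α), PySem.List.sorted (l ++ [x]) key false =
        PySem.List.insertBy (fun a b => decide (key a < key b)) x (PySem.List.sorted l key false) := by
      intro l
      rw [PySem.List.sorted_eq_foldl_insertBy, PySem.List.sorted_eq_foldl_insertBy,
        List.foldl_append]
      rfl
    have hsorted : (PySem.List.sorted xs key false).Pairwise (fun a b => key a ≤ key b) :=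
      PySem.List.sorted_pairwise xs key
    rw [hstep, pv_ins_filter key p x _ hsorted, List.filter_append]
    cases hpx : p x
    · simp [hpx, ih]
    · simp only [if_pos]
      rw [ih, List.filter_cons]
      simp [hpx, hstep]

-- the head of a stable sort is Python's min (first extremal element)
theorem pv_head_sorted {α : Type} (key : α → Nat) (xs : List α) :
    (PySem.List.sorted xs key false).head? = PySem.List.min? xs key := by
  induction xs using List.reverseRecOn with
  | nil => simp [PySem.List.sorted, PySem.List.min?]
  | append_singleton xs x ih =>
    have hstep : PySem.List.sorted (xs ++ [x]) key false =
        PySem.List.insertBy (fun a b => decide (key a < key b)) x (PySem.List.sorted xs key false) := by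
      rw [PySem.List.sorted_eq_foldl_insertBy, PySem.List.sorted_eq_foldl_insertBy,
        List.foldl_append]
      rfl
    have hmin : PySem.List.min? (xs ++ [x]) key =
        (match PySem.List.min? xs key with
          | none => some x
          | some m => if key x < key m then some x else some m) := by
      simp only [PySem.List.min?, List.foldl_append, List.foldl_cons, List.foldl_nil]
      rfl
    rw [hstep, hmin, ← ih]
    cases hs : PySem.List.sorted xs key false with
    | nil => simp [PySem.List.insertBy]
    | cons m t =>
      by_cases hxm : key x < key m
      · simp [PySem.List.insertBy, hxm]
      · simp only [PySem.List.insertBy, hxm, decide_false]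
        simp [hxm]

-- Source B's scan is head-of-filter
theorem pv_firstOdd_eq (d : List (String × List Int)) (l : List String) :
    firstOddKey d l = (l.filter (fun k => pyLen d k % 2 == 1)).head? := by
  induction l with
  | nil => rfl
  | cons k rest ih =>
    by_cases h : pyLen d k % 2 == 1
    · simp [firstOddKey, h]
    · simp [firstOddKey, h, ih]

-- if no key has odd length, the even filter keeps every key
theorem pv_even_filter (d : List (String × List Int)) (l : List String)
    (h : l.filter (fun k => pyLen d k % 2 == 1) = []) :
    l.filter (fun k => pyLen d k % 2 == 0) = l := by
  induction l with
  | nil => rfl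
  | cons k rest ih =>
    rw [List.filter_cons] at h ⊢
    by_cases hk : pyLen d k % 2 == 1
    · simp [hk] at h
    · have h0 : pyLen d k % 2 == 0 := by
        have := Nat.mod_two_eq_zero_or_one (pyLen d k)
        rcases this with h' | h' <;> simp [h'] at hk ⊢
      simp only [hk, if_neg, Bool.false_eq_true, not_false_iff, if_neg] at h
      simp [h0, ih h]

-- ===== VERDICT (by name: the statement is the Claim_ definition above) =====
theorem select_min_key_spec : Claim_equal_select_min_key := by
  intro d _
  unfold Spec_select_min_key select_min_key select_min_key_alt
  simp only []
  set ks := d.map Prod.fst with hks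
  have hfo : firstOddKey d (PySem.List.sorted ks (pyLen d) false) =
      PySem.List.min? (ks.filter (fun k => pyLen d k % 2 == 1)) (pyLen d) := by
    rw [pv_firstOdd_eq, pv_sorted_filter, pv_head_sorted]
  by_cases hodd : ks.filter (fun k => pyLen d k % 2 == 1) ≠ []
  · -- odd keys exist: both sides are min over the odd keys
    rw [if_pos hodd, hfo]
    cases hm : PySem.List.min? (ks.filter (fun k => pyLen d k % 2 == 1)) (pyLen d) with
    | none => exact absurd ((PySem.List.min?_eq_none_iff _ _).mp hm) hodd
    | some m => rfl
  · push Not at hodd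
    rw [if_neg (by simpa using hodd)]
    rw [hfo, hodd]
    have hnone : (PySem.List.min? ([] : List String) (pyLen d)) = none := rfl
    rw [hnone]
    rw [pv_even_filter d ks hodd]
    by_cases hne : ks ≠ []
    · rw [if_pos hne, ← pv_head_sorted]
    · push Not at hne
      rw [hne]
      simp [PySem.List.sorted]
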